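-- pv_equiv track=rewrite | github.com/naufalfaisa/gamdl | gamdl/cli/interactive_prompts.py | _parse_track_selection
-- ===== SOURCE A (Python) =====
-- def _parse_track_selection(selection: str, total: int) -> list[int] | None:
--     tokens = [token.strip().lower() for token in selection.split(",") if token.strip()]
--     if not tokens:
--         return None
--
--     if len(tokens) == 1 and tokens[0] == "all":
--         return list(range(1, total + 1))
--
--     selected_indices = []
--     for token in tokens:
--         if token == "all":
--             return list(range(1, total + 1))
--
--         if "-" in token:
--             start_text, end_text = token.split("-", 1)
--             if not start_text.isdigit() or not end_text.isdigit():
--                 return None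
--             start_index = int(start_text)
--             end_index = int(end_text)
--             if start_index > end_index:
--                 start_index, end_index = end_index, start_index
--             selected_indices.extend(range(start_index, end_index + 1))
--         else:
--             if not token.isdigit():
--                 return None
--             selected_indices.append(int(token))
--
--     filtered_indices = []
--     for index in sorted(set(selected_indices)):
--         if 1 <= index <= total:
--             filtered_indices.append(index)
--
--     if not filtered_indices:
--         return None
--
--     return filtered_indices
-- ===== SOURCE B (Python) =====
-- def _token_bounds(token):
--     if "-" in token:
--         start_text, end_text = token.split("-", 1)
--         if not start_text.isdigit() or not end_text.isdigit():
--             return None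
--         lo, hi = int(start_text), int(end_text)
--         return (hi, lo) if hi < lo else (lo, hi)
--     if not token.isdigit():
--         return None
--     value = int(token)
--     return (value, value)
--
--
-- def _parse_track_selection(selection: str, total: int) -> list[int] | None:
--     tokens = []
--     for raw in selection.split(","):
--         cleaned = raw.strip()
--         if cleaned:
--             tokens.append(cleaned.lower())
--     if not tokens:
--         return None
--
--     if len(tokens) == 1 and tokens[0] == "all":
--         return list(range(1, total + 1))
--
--     present = set()
--     for token in tokens:
--         if token == "all":
--             return list(range(1, total + 1))
--         bounds = _token_bounds(token)
--         if bounds is None: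
--             return None
--         lo, hi = bounds
--         present.update(range(max(lo, 1), min(hi, total) + 1))
--
--     result = [index for index in range(1, total + 1) if index in present]
--     return result if result else None
-- ===== Notes on version B (the rewrite author's own statement) =====
-- stated objective: alternative
-- what changed: B factors token validation into a _token_bounds helper and, instead of A's raw index list followed by sorted(set(...)) and an in-range filter pass, records each token's clamped range in a presence set and emits the answer by one sweep over range(1, total+1), so the sort disappears entirely.
import Mathlib
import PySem

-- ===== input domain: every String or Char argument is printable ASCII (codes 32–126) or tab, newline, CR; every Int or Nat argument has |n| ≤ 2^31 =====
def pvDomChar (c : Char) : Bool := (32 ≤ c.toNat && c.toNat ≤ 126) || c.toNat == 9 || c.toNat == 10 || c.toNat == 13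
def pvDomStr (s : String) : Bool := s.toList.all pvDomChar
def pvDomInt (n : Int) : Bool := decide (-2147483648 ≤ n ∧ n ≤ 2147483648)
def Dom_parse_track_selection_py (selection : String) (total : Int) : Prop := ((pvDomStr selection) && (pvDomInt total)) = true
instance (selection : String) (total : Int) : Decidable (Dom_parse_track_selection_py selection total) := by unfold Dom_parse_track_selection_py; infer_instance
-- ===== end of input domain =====

-- B factors token validation into a helper and replaces A's raw index list + sorted(set(...)) +
-- in-range filter pass by a presence set of clamped values swept once over range(1, total+1),
-- so no sort is performed (objective: alternative).

-- ===== PORT A =====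
-- A's tokenization: [token.strip().lower() for token in selection.split(",") if token.strip()]
def pvTokensA (selection : String) : List String :=
  ((PySem.Str.split? selection ",").getD []).filterMap (fun token =>
    if PySem.Str.strip token = "" then none
    else some (PySem.Str.lower (PySem.Str.strip token)))

def pvLoopA (total : Int) (tokens : List String) (acc : List Int) : Option (List Int) :=
  match tokens with
  | [] =>
      -- sorted(set(selected_indices)) filtered to 1..total
      let filtered := (PySem.List.sorted (PySem.Set.ofList acc) (fun x => x) false).filter
        (fun index => decide (1 ≤ index ∧ index ≤ total))
      if filtered = [] then none else some filtered
  | token :: rest =>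
      if token = "all" then some (PySem.List.pyRange 1 (total + 1) 1)
      else if PySem.Str.isIn "-" token then
        match PySem.Str.splitMax? token "-" 1 with
        | some (startText :: endText :: []) =>
            if !(PySem.Str.strIsdigit startText) || !(PySem.Str.strIsdigit endText) then none
            else
              match PySem.Int.ofStr? startText, PySem.Int.ofStr? endText with
              | some startIndex, some endIndex =>
                  let p := if startIndex > endIndex then (endIndex, startIndex)
                           else (startIndex, endIndex)
                  pvLoopA total rest (acc ++ PySem.List.pyRange p.1 (p.2 + 1) 1)
              | _, _ => none  -- unreachable: isdigit guarantees int() parses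
        | _ => none  -- unreachable: "-" in token gives exactly two pieces
      else
        if !(PySem.Str.strIsdigit token) then none
        else
          match PySem.Int.ofStr? token with
          | some v => pvLoopA total rest (acc ++ [v])
          | none => none  -- unreachable: isdigit guarantees int() parses

def parse_track_selection_py (selection : String) (total : Int) : Option (List Int) :=
  let tokens := pvTokensA selection
  if tokens = [] then none
  else if tokens.length = 1 && (tokens.headD "" == "all") then
    some (PySem.List.pyRange 1 (total + 1) 1)
  else pvLoopA total tokens []

-- ===== PORT B =====
-- B's tokenization loop: for raw in selection.split(","): cleaned = raw.strip(); if cleaned: append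
def pvTokensB (selection : String) : List String :=
  ((PySem.Str.split? selection ",").getD []).foldl
    (fun toks raw =>
      let cleaned := PySem.Str.strip raw
      if cleaned = "" then toks else toks ++ [PySem.Str.lower cleaned]) []

-- _token_bounds: (lo, hi) of a token, or none if malformed
def pvBounds? (token : String) : Option (Int × Int) :=
  if PySem.Str.isIn "-" token then
    match PySem.Str.splitMax? token "-" 1 with
    | some (startText :: endText :: []) =>
        if !(PySem.Str.strIsdigit startText) || !(PySem.Str.strIsdigit endText) then none
        else
          match PySem.Int.ofStr? startText, PySem.Int.ofStr? endText with
          | some lo, some hi => some (if hi < lo then (hi, lo) else (lo, hi))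
          | _, _ => none  -- unreachable: isdigit guarantees int() parses
    | _ => none  -- unreachable: "-" in token gives exactly two pieces
  else if !(PySem.Str.strIsdigit token) then none
  else
    match PySem.Int.ofStr? token with
    | some value => some (value, value)
    | none => none  -- unreachable: isdigit guarantees int() parses

def pvLoopB (total : Int) (tokens : List String) (present : PySem.Set Int) : Option (List Int) :=
  match tokens with
  | [] =>
      -- [index for index in range(1, total + 1) if index in present]
      let result := (PySem.List.pyRange 1 (total + 1) 1).filter
        (fun index => PySem.Set.contains present index)
      if result = [] then none else some result
  | token :: rest =>
      if token = "all" then some (PySem.List.pyRange 1 (total + 1) 1)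
      else
        match pvBounds? token with
        | none => none
        | some (lo, hi) =>
            pvLoopB total rest
              (PySem.Set.update present (PySem.List.pyRange (max lo 1) (min hi total + 1) 1))

def parse_track_selection_py_alt (selection : String) (total : Int) : Option (List Int) :=
  let tokens := pvTokensB selection
  if tokens = [] then none
  else if tokens.length = 1 && (tokens.headD "" == "all") then
    some (PySem.List.pyRange 1 (total + 1) 1)
  else pvLoopB total tokens PySem.Set.empty

-- ===== PRECONDITION & SPEC =====
def Spec_parse_track_selection_py (selection : String) (total : Int) (out : Option (List Int)) : Prop := out = parse_track_selection_py_alt selection total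
instance (selection : String) (total : Int) (out : Option (List Int)) : Decidable (Spec_parse_track_selection_py selection total out) := by unfold Spec_parse_track_selection_py; infer_instance

-- ===== CLAIM (what is proved, stated in full; the proofs are below) =====
def Claim_equal_parse_track_selection_py : Prop := ∀ (selection : String) (total : Int), Dom_parse_track_selection_py selection total → Spec_parse_track_selection_py selection total (parse_track_selection_py selection total)

-- ===== LEMMAS AND PROOFS =====

-- B's append-foldl tokenizer produces A's filterMap tokenization
theorem pvTokensB_go (l : List String) (init : List String) :
    l.foldl (fun toks raw =>
      let cleaned := PySem.Str.strip raw
      if cleaned = "" then toks else toks ++ [PySem.Str.lower cleaned]) init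
    = init ++ l.filterMap (fun token =>
        if PySem.Str.strip token = "" then none
        else some (PySem.Str.lower (PySem.Str.strip token))) := by
  induction l generalizing init with
  | nil => simp
  | cons raw rest ih =>
    simp only [List.foldl_cons, List.filterMap_cons]
    by_cases h : PySem.Str.strip raw = ""
    · simp [h, ih]
    · simp [h, ih]

theorem pvTokensB_eq (selection : String) : pvTokensB selection = pvTokensA selection := by
  unfold pvTokensB pvTokensA
  rw [pvTokensB_go]
  simp

-- two strictly increasing integer lists with the same members are equal
theorem pvStrictExt {l1 l2 : List Int} (h1 : l1.Pairwise (· < ·)) (h2 : l2.Pairwise (· < ·))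
    (hm : ∀ x, x ∈ l1 ↔ x ∈ l2) : l1 = l2 := by
  induction l1 generalizing l2 with
  | nil =>
    cases l2 with
    | nil => rfl
    | cons b t2 => exact absurd ((hm b).mpr List.mem_cons_self) (List.not_mem_nil)
  | cons a t1 ih =>
    cases l2 with
    | nil => exact absurd ((hm a).mp List.mem_cons_self) (List.not_mem_nil)
    | cons b t2 =>
      obtain ⟨ha1, hp1⟩ := List.pairwise_cons.mp h1
      obtain ⟨hb2, hp2⟩ := List.pairwise_cons.mp h2
      have hab : a = b := by
        rcases List.mem_cons.mp ((hm a).mp List.mem_cons_self) with h | h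
        · exact h
        · rcases List.mem_cons.mp ((hm b).mpr List.mem_cons_self) with h' | h'
          · exact h'.symm
          · have := ha1 b h'
            have := hb2 a h
            omega
      subst hab
      have : t1 = t2 := by
        apply ih hp1 hp2
        intro x
        constructor
        · intro hx
          rcases List.mem_cons.mp ((hm x).mp (List.mem_cons_of_mem a hx)) with rfl | h
          · exact absurd (ha1 x hx) (lt_irrefl x)
          · exact h
        · intro hx
          rcases List.mem_cons.mp ((hm x).mpr (List.mem_cons_of_mem a hx)) with rfl | h
          · exact absurd (hb2 x hx) (lt_irrefl x)
          · exact h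
      rw [this]

-- the loop invariant: B's presence set holds exactly A's collected indices clamped to 1..total
theorem pvLoop_eq (total : Int) (tokens : List String) (acc : List Int) (present : PySem.Set Int)
    (hinv : ∀ x : Int, x ∈ present ↔ x ∈ acc ∧ 1 ≤ x ∧ x ≤ total) :
    pvLoopA total tokens acc = pvLoopB total tokens present := by
  induction tokens generalizing acc present with
  | nil =>
    simp only [pvLoopA, pvLoopB]
    have hmem : ∀ x, x ∈ (PySem.List.sorted (PySem.Set.ofList acc) (fun x => x) false).filter
        (fun index => decide (1 ≤ index ∧ index ≤ total))
        ↔ x ∈ (PySem.List.pyRange 1 (total + 1) 1).filter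
            (fun index => PySem.Set.contains present index) := by
      intro x
      simp only [List.mem_filter, PySem.List.mem_sorted, PySem.Set.mem_ofList,
        PySem.List.mem_pyRange_one, PySem.Set.contains, List.contains_iff_mem,
        decide_eq_true_eq, hinv x]
      constructor
      · rintro ⟨hm, h1, h2⟩
        exact ⟨⟨h1, by omega⟩, hm, h1, h2⟩
      · rintro ⟨⟨h1, h2⟩, hm, _, _⟩
        exact ⟨hm, h1, by omega⟩
    have heq : (PySem.List.sorted (PySem.Set.ofList acc) (fun x => x) false).filter
        (fun index => decide (1 ≤ index ∧ index ≤ total))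
        = (PySem.List.pyRange 1 (total + 1) 1).filter
            (fun index => PySem.Set.contains present index) :=
      pvStrictExt
        (List.Pairwise.sublist List.filter_sublist (PySem.List.sorted_ofList_pairwise_lt acc))
        (List.Pairwise.sublist List.filter_sublist (PySem.List.pairwise_lt_pyRange_one _ _))
        hmem
    rw [heq]
  | cons token rest ih =>
    simp only [pvLoopA, pvLoopB]
    by_cases hall : token = "all"
    · simp [hall]
    · simp only [if_neg hall]
      have hnext : ∀ lo hi : Int, lo ≤ hi →
          pvLoopA total rest (acc ++ PySem.List.pyRange lo (hi + 1) 1)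
          = pvLoopB total rest
              (PySem.Set.update present (PySem.List.pyRange (max lo 1) (min hi total + 1) 1)) := by
        intro lo hi hle
        apply ih
        intro x
        simp only [PySem.Set.mem_update, List.mem_append, PySem.List.mem_pyRange_one, hinv x]
        constructor
        · rintro (⟨hm, h1, h2⟩ | ⟨h1, h2⟩)
          · exact ⟨Or.inl hm, h1, h2⟩
          · exact ⟨Or.inr ⟨by omega, by omega⟩, by omega, by omega⟩
        · rintro ⟨hm | ⟨h1, h2⟩, hx1, hx2⟩
          · exact Or.inl ⟨hm, hx1, hx2⟩
          · exact Or.inr ⟨by omega, by omega⟩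
      unfold pvBounds?
      by_cases hdash : PySem.Str.isIn "-" token = true
      · simp only [hdash, if_true]
        rcases hsp : PySem.Str.splitMax? token "-" 1 with _ | pieces
        · rfl
        · rcases pieces with _ | ⟨startText, _ | ⟨endText, _ | ⟨c, tl⟩⟩⟩
          · rfl
          · rfl
          · by_cases hdig : (!PySem.Str.strIsdigit startText || !PySem.Str.strIsdigit endText) = true
            · simp only [hdig, if_true]
            · simp only [hdig]
              rcases hos : PySem.Int.ofStr? startText with _ | startIndex
              · rfl
              · rcases hoe : PySem.Int.ofStr? endText with _ | endIndex
                · rfl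
                · simp only []
                  by_cases hswap : endIndex < startIndex
                  · simp only [if_pos hswap, gt_iff_lt]
                    exact hnext endIndex startIndex (by omega)
                  · simp only [if_neg hswap, gt_iff_lt]
                    exact hnext startIndex endIndex (by omega)
          · rfl
      · simp only [Bool.not_eq_true] at hdash
        simp only [hdash, Bool.false_eq_true, if_false]
        by_cases hdig : (!PySem.Str.strIsdigit token) = true
        · simp only [hdig, if_true]
        · simp only [hdig]
          rcases hov : PySem.Int.ofStr? token with _ | v
          · rfl
          · have := hnext v v (le_refl v)
            rw [PySem.List.pyRange_one_singleton] at this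
            exact this

-- ===== VERDICT (by name: the statement is the Claim_ definition above) =====
theorem parse_track_selection_py_spec : Claim_equal_parse_track_selection_py := by
  intro selection total _
  unfold Spec_parse_track_selection_py parse_track_selection_py parse_track_selection_py_alt
  rw [pvTokensB_eq]
  simp only []
  split_ifs with h0 h1
  · rfl
  · rfl
  · exact pvLoop_eq total (pvTokensA selection) [] PySem.Set.empty (by simp [PySem.Set.empty])
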